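-- pv_equiv track=rewrite | github.com/AymanIssa1/Interview-Bit | Arrays_Problems/Simulation_Array/Make equal elements Array.py | solve
-- ===== SOURCE A (Python) =====
-- def solve(A, B):
--     for outerIndex in range(0, len(A)):
--         val = A[outerIndex]
--         for innerIndex in range(0, len(A)):
--             if outerIndex == innerIndex:
--                 continue
--
--             if (val == A[innerIndex]) or (val < A[innerIndex] and val == A[innerIndex] - B) or (
--                     val > A[innerIndex] and val == A[innerIndex] + B):
--                 if innerIndex == len(A) - 1:
--                     return 1
--                 continue
--             else:
--                 break
--
--     return 0
--
-- A = [3, 2, 3, 3, 1, 2, 3, 2, 2, 1, 2, 2, 1, 3, 2, 3, 2, 2, 1, 2, 1, 1, 1, 1, 1, 3, 3, 1, 1, 3, 3, 3, 2, 3, 2]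
--
-- B = 2
-- ===== SOURCE B (Python) =====
-- def solve(A, B):
--     # Values can be equalized by adding/subtracting B iff the distinct values
--     # are {v}, {v, v+B} or {v-B, v, v+B} for some v (with B > 0 for the last two).
--     s = sorted(set(A))
--     if len(s) <= 1:
--         return 1
--     if B <= 0:
--         return 0
--     if len(s) == 2:
--         return 1 if s[1] - s[0] == B else 0
--     if len(s) == 3:
--         return 1 if s[1] - s[0] == B and s[2] - s[1] == B else 0
--     return 0
-- ===== Notes on version B (the rewrite author's own statement) =====
-- stated objective: simpler
-- what changed: Replaces the quadratic all-pairs pivot scan by a single sorted(set(A)) of the distinct values checked against the shapes {v}, {v,v+B}, {v-B,v,v+B}.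
-- intended difference: On lists of length <= 1, and on lists whose distinct values are {v-B,v,v+B} (B>0) with the middle value v occurring only at the last index, A returns 0 while B returns 1; B's value is intended since all elements really can be made equal (A's pivot loop never lets the last index act as pivot). — e.g. on solve([1, 5, 3], 2): A returns 0, B returns 1
import Mathlib
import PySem

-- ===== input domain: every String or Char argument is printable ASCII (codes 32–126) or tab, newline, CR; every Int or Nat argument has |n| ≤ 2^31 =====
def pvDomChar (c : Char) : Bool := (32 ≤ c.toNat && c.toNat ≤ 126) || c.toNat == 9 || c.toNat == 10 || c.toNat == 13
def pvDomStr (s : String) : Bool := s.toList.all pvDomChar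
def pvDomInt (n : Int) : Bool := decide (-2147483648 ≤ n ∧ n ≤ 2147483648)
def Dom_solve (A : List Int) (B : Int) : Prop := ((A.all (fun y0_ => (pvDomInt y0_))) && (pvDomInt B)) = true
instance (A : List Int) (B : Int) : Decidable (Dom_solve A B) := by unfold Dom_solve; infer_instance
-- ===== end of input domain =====

-- B replaces A's quadratic all-pairs pivot scan by checking sorted(set(A)) against the three
-- legal shapes; on A's missed corner (see D_solve below) B returns the intended 1.

-- ===== PORT A =====
-- the big if-condition of A's inner loop
def solveCond (B val x : Int) : Bool :=
  (val == x) || (val < x && val == x - B) || (val > x && val == x + B)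

-- inner 'for innerIndex in range(0, len(A))', iterating over the remaining indices;
-- 'some 1' = the 'return 1', 'none' = the loop broke or fell through
def solveInner (A : List Int) (B val : Int) (outer : Nat) : List Nat → Option Int
  | [] => none
  | j :: rest =>
    if outer = j then solveInner A B val outer rest
    else if solveCond B val (A.getD j 0) then
      if j = A.length - 1 then some 1 else solveInner A B val outer rest
    else none

-- outer 'for outerIndex in range(0, len(A))'; falls through to 'return 0'
def solveOuter (A : List Int) (B : Int) : List Nat → Int
  | [] => 0
  | i :: rest =>
    match solveInner A B (A.getD i 0) i (List.range A.length) with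
    | some r => r
    | none => solveOuter A B rest

def solve (A : List Int) (B : Int) : Int := solveOuter A B (List.range A.length)

-- ===== PORT B =====
def solve_alt (A : List Int) (B : Int) : Int :=
  let s := PySem.List.sorted (PySem.Set.ofList A) (fun x => x) false
  if s.length ≤ 1 then 1
  else if B ≤ 0 then 0
  else if s.length = 2 then (if s.getD 1 0 - s.getD 0 0 = B then 1 else 0)
  else if s.length = 3 then
    (if s.getD 1 0 - s.getD 0 0 = B ∧ s.getD 2 0 - s.getD 1 0 = B then 1 else 0)
  else 0

-- ===== PRECONDITION & SPEC =====
-- On lists of length ≤ 1, and on lists (B > 0) whose last element v appears nowhere else while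
-- every earlier element is v-B or v+B, both occurring, A returns 0 but B returns 1; B's value is
-- intended since all elements really can be made equal (A's loop never lets the last index be pivot).
def D_solve (A : List Int) (B : Int) : Prop :=
  A.length ≤ 1 ∨
  (0 < B ∧ (A.getLastD 0 - B) ∈ A.dropLast ∧ (A.getLastD 0 + B) ∈ A.dropLast ∧
    ∀ x ∈ A.dropLast, x = A.getLastD 0 - B ∨ x = A.getLastD 0 + B)
instance (A : List Int) (B : Int) : Decidable (D_solve A B) := by unfold D_solve; infer_instance

def Spec_solve (A : List Int) (B : Int) (out : Int) : Prop := ¬ D_solve A B → out = solve_alt A B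
instance (A : List Int) (B : Int) (out : Int) : Decidable (Spec_solve A B out) := by unfold Spec_solve; infer_instance

def pvDiffWitness_solve : List Int × Int := ([1, 5, 3], 2)
def pvDiffWitnessOut_solve : Int × Int := (0, 1)

-- ===== CLAIM (what is proved, stated in full; the proofs are below) =====
def Claim_unchanged_solve : Prop := ∀ (A : List Int) (B : Int), Dom_solve A B → Spec_solve A B (solve A B)
def Claim_changed_solve : Prop := Dom_solve (pvDiffWitness_solve.1) (pvDiffWitness_solve.2) ∧ D_solve (pvDiffWitness_solve.1) (pvDiffWitness_solve.2) ∧ solve (pvDiffWitness_solve.1) (pvDiffWitness_solve.2) = pvDiffWitnessOut_solve.1 ∧ solve_alt (pvDiffWitness_solve.1) (pvDiffWitness_solve.2) = pvDiffWitnessOut_solve.2 ∧ pvDiffWitnessOut_solve.1 ≠ pvDiffWitnessOut_solve.2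
def Claim_exact_solve : Prop := ∀ (A : List Int) (B : Int), Dom_solve A B → D_solve A B → solve A B ≠ solve_alt A B

-- ===== LEMMAS AND PROOFS =====

-- propositional form of A's inner condition
def CondP (B v x : Int) : Prop := x = v ∨ (0 < B ∧ (x = v + B ∨ x = v - B))

-- index m can make A's inner loop return 1
def Pivot (A : List Int) (B : Int) (m : Nat) : Prop :=
  m + 1 < A.length ∧ ∀ k, k < A.length → CondP B (A.getD m 0) (A.getD k 0)

lemma condP_iff (B v x : Int) : solveCond B v x = true ↔ CondP B v x := by
  simp [solveCond, CondP]; omega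

lemma condP_refl (B v : Int) : CondP B v v := Or.inl rfl

lemma inner_cases (A : List Int) (B val : Int) (outer : Nat) : ∀ js,
    solveInner A B val outer js = some 1 ∨ solveInner A B val outer js = none := by
  intro js
  induction js with
  | nil => exact Or.inr rfl
  | cons j rest ih =>
    rw [solveInner]
    by_cases ho : outer = j
    · rw [if_pos ho]; exact ih
    · rw [if_neg ho]
      by_cases hc : solveCond B val (A.getD j 0) = true
      · rw [if_pos hc]
        by_cases hl : j = A.length - 1
        · rw [if_pos hl]; exact Or.inl rfl
        · rw [if_neg hl]; exact ih
      · rw [if_neg hc]; exact Or.inr rfl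

lemma inner_aux (A : List Int) (B val : Int) (outer : Nat) : ∀ n, n ≤ A.length →
    (solveInner A B val outer (List.range' (A.length - n) n) = some 1 ↔
      (A.length - 1 ≠ outer ∧ 0 < n ∧
        ∀ k, A.length - n ≤ k → k < A.length →
          (k = outer ∨ solveCond B val (A.getD k 0) = true))) := by
  intro n
  induction n with
  | zero =>
    intro _
    simp [solveInner]
  | succ n ih =>
    intro hle
    have hs : A.length - (n + 1) < A.length := by omega
    have hss : A.length - (n + 1) + 1 = A.length - n := by omega
    rw [List.range'_succ, hss, solveInner]
    by_cases ho : outer = A.length - (n + 1)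
    · rw [if_pos ho, ih (by omega)]
      constructor
      · rintro ⟨h1, h2, h3⟩
        refine ⟨h1, by omega, fun k hk1 hk2 => ?_⟩
        rcases Nat.eq_or_lt_of_le hk1 with h | h
        · exact Or.inl (by omega)
        · exact h3 k (by omega) hk2
      · rintro ⟨h1, _, h3⟩
        exact ⟨h1, by omega, fun k hk1 hk2 => h3 k (by omega) hk2⟩
    · rw [if_neg ho]
      by_cases hc : solveCond B val (A.getD (A.length - (n + 1)) 0) = true
      · rw [if_pos hc]
        by_cases hl : A.length - (n + 1) = A.length - 1
        · rw [if_pos hl]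
          constructor
          · intro _
            refine ⟨by omega, by omega, fun k hk1 hk2 => Or.inr ?_⟩
            have : k = A.length - (n + 1) := by omega
            exact this ▸ hc
          · intro _; rfl
        · rw [if_neg hl]
          have hn : 0 < n := by omega
          rw [ih (by omega)]
          constructor
          · rintro ⟨h1, h2, h3⟩
            refine ⟨h1, by omega, fun k hk1 hk2 => ?_⟩
            rcases Nat.eq_or_lt_of_le hk1 with h | h
            · exact Or.inr (h ▸ hc)
            · exact h3 k (by omega) hk2
          · rintro ⟨h1, _, h3⟩
            exact ⟨h1, hn, fun k hk1 hk2 => h3 k (by omega) hk2⟩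
      · rw [if_neg hc]
        constructor
        · intro h; exact absurd h (by simp)
        · rintro ⟨h1, h2, h3⟩
          rcases h3 (A.length - (n + 1)) (by omega) hs with h | h
          · exact absurd h.symm ho
          · exact absurd h hc

lemma inner_pivot_iff (A : List Int) (B : Int) (m : Nat) (hm : m < A.length) :
    solveInner A B (A.getD m 0) m (List.range A.length) = some 1 ↔ Pivot A B m := by
  have h := inner_aux A B (A.getD m 0) m A.length le_rfl
  rw [Nat.sub_self] at h
  rw [List.range_eq_range', h, Pivot]
  constructor
  · rintro ⟨hne, hlen, hall⟩
    refine ⟨by omega, fun k hk => ?_⟩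
    rcases hall k (Nat.zero_le _) hk with h | h
    · exact h ▸ condP_refl B _
    · exact (condP_iff _ _ _).mp h
  · rintro ⟨hlt, hall⟩
    exact ⟨by omega, by omega, fun k _ hk => Or.inr ((condP_iff _ _ _).mpr (hall k hk))⟩

lemma outer_one (A : List Int) (B : Int) : ∀ js : List Nat,
    (∀ i ∈ js, i < A.length) → (∃ m ∈ js, Pivot A B m) → solveOuter A B js = 1 := by
  intro js
  induction js with
  | nil => rintro _ ⟨m, hm, _⟩; exact absurd hm (List.not_mem_nil)
  | cons i rest ih =>
    rintro hlt ⟨m, hmem, hp⟩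
    rw [solveOuter]
    rcases inner_cases A B (A.getD i 0) i (List.range A.length) with hc | hc
    · rw [hc]
    · rw [hc]
      rcases List.mem_cons.mp hmem with h | h
      · rw [(inner_pivot_iff A B i (hlt i List.mem_cons_self)).mpr (h ▸ hp)] at hc
        injection hc
      · exact ih (fun x hx => hlt x (List.mem_cons_of_mem i hx)) ⟨m, h, hp⟩

lemma outer_zero (A : List Int) (B : Int) : ∀ js : List Nat,
    (∀ i ∈ js, i < A.length) → (∀ m, ¬ Pivot A B m) → solveOuter A B js = 0 := by
  intro js
  induction js with
  | nil => intro _ _; rfl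
  | cons i rest ih =>
    intro hlt h
    rw [solveOuter]
    rcases inner_cases A B (A.getD i 0) i (List.range A.length) with hc | hc
    · exact absurd ((inner_pivot_iff A B i (hlt i List.mem_cons_self)).mp hc) (h i)
    · rw [hc]
      exact ih (fun x hx => hlt x (List.mem_cons_of_mem i hx)) h

lemma solve_one (A : List Int) (B : Int) (h : ∃ m, Pivot A B m) : solve A B = 1 := by
  obtain ⟨m, hp⟩ := h
  exact outer_one A B (List.range A.length) (fun i hi => List.mem_range.mp hi)
    ⟨m, List.mem_range.mpr (by have := hp.1; omega), hp⟩

lemma solve_zero (A : List Int) (B : Int) (h : ∀ m, ¬ Pivot A B m) : solve A B = 0 :=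
  outer_zero A B (List.range A.length) (fun i hi => List.mem_range.mp hi) h

lemma getD_mem (A : List Int) (k : Nat) (hk : k < A.length) : A.getD k 0 ∈ A := by
  rw [List.getD_eq_getElem A 0 hk]; exact List.getElem_mem hk

lemma mem_getD (A : List Int) (x : Int) (hx : x ∈ A) : ∃ k, k < A.length ∧ A.getD k 0 = x := by
  obtain ⟨k, hk, he⟩ := List.mem_iff_getElem.mp hx
  exact ⟨k, hk, by rw [List.getD_eq_getElem A 0 hk, he]⟩

lemma mem_dropLast_iff (A : List Int) (x : Int) :
    x ∈ A.dropLast ↔ ∃ k, k + 1 < A.length ∧ A.getD k 0 = x := by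
  rw [List.mem_iff_getElem]
  constructor
  · rintro ⟨k, hk, he⟩
    rw [List.getElem_dropLast] at he
    refine ⟨k, by simp at hk; omega, ?_⟩
    rw [List.getD_eq_getElem A 0 (by simp at hk; omega), he]
  · rintro ⟨k, hk, he⟩
    refine ⟨k, by simp; omega, ?_⟩
    rw [List.getElem_dropLast, ← List.getD_eq_getElem A 0 (by omega), he]

lemma getLastD_eq_getD (A : List Int) (h : 0 < A.length) :
    A.getLastD 0 = A.getD (A.length - 1) 0 := by
  rw [List.getD_eq_getElem A 0 (by omega), List.getLastD_eq_getLast?,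
    List.getLast?_eq_getElem?, List.getElem?_eq_getElem (by omega)]
  rfl

-- every element is in the front part or equals the last element
lemma mem_split (A : List Int) (x : Int) (hx : x ∈ A) :
    x ∈ A.dropLast ∨ x = A.getLastD 0 := by
  obtain ⟨k, hk, he⟩ := mem_getD A x hx
  by_cases h : k + 1 < A.length
  · exact Or.inl ((mem_dropLast_iff A x).mpr ⟨k, h, he⟩)
  · right
    rw [getLastD_eq_getD A (by omega), ← he]
    congr 1
    omega

-- the facts the proofs need, unpacked from D_solve's second disjunct
lemma D2_facts (A : List Int) (B : Int) (hB : 0 < B)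
    (hm : (A.getLastD 0 - B) ∈ A.dropLast) (hp : (A.getLastD 0 + B) ∈ A.dropLast)
    (hall : ∀ x ∈ A.dropLast, x = A.getLastD 0 - B ∨ x = A.getLastD 0 + B) :
    2 ≤ A.length ∧ A.getLastD 0 ∈ A ∧ (A.getLastD 0 - B) ∈ A ∧ (A.getLastD 0 + B) ∈ A ∧
      (∀ x ∈ A, x = A.getLastD 0 - B ∨ x = A.getLastD 0 ∨ x = A.getLastD 0 + B) ∧
      A.getLastD 0 ∉ A.dropLast := by
  have hlen : 2 ≤ A.length := by
    obtain ⟨k, hk, _⟩ := (mem_dropLast_iff A _).mp hm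
    omega
  have hLA : A.getLastD 0 ∈ A := by
    rw [getLastD_eq_getD A (by omega)]
    exact getD_mem A _ (by omega)
  refine ⟨hlen, hLA, List.mem_of_mem_dropLast hm, List.mem_of_mem_dropLast hp, ?_, ?_⟩
  · intro x hx
    rcases mem_split A x hx with h | h
    · rcases hall x h with h' | h' <;> omega
    · omega
  · intro h
    rcases hall _ h with h' | h' <;> omega

-- with four distinct values present, no pivot value can cover them all
lemma no_pivot_of_four (A : List Int) (B : Int) (a b c d : Int)
    (ha : a ∈ A) (hb : b ∈ A) (hc : c ∈ A) (hd : d ∈ A)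
    (hab : a < b) (hbc : b < c) (hcd : c < d) : ∀ m, ¬ Pivot A B m := by
  rintro m ⟨hm, hall⟩
  have hv : ∀ x ∈ A, CondP B (A.getD m 0) x := by
    intro x hx
    obtain ⟨k, hk, he⟩ := mem_getD A x hx
    exact he ▸ hall k hk
  have h1 := hv a ha
  have h2 := hv b hb
  have h3 := hv c hc
  have h4 := hv d hd
  unfold CondP at h1 h2 h3 h4
  omega

-- ===== VERDICT (by name: the statement is the Claim_ definition above) =====
theorem solve_spec : Claim_unchanged_solve := by
  intro A B _ hD
  have hmem : ∀ x, x ∈ PySem.List.sorted (PySem.Set.ofList A) (fun x => x) false ↔ x ∈ A := by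
    intro x; rw [PySem.List.mem_sorted, PySem.Set.mem_ofList]
  have hpw := PySem.List.sorted_ofList_pairwise_lt (xs := A)
  unfold solve_alt
  have hlen2 : 2 ≤ A.length := by
    by_contra h
    exact hD (Or.inl (by omega))
  have hAne : A ≠ [] := by intro h; rw [h] at hlen2; simp at hlen2
  match hsv : PySem.List.sorted (PySem.Set.ofList A) (fun x => x) false with
  | [] =>
    exfalso
    obtain ⟨x, hx⟩ := List.exists_mem_of_ne_nil A hAne
    have := (hmem x).mpr hx
    rw [hsv] at this; simp at this
  | [a] =>
    simp only [List.length_singleton]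
    rw [if_pos (by omega)]
    have hall : ∀ x ∈ A, x = a := by
      intro x hx
      have := (hmem x).mpr hx
      rw [hsv] at this; simpa using this
    apply solve_one
    refine ⟨0, by omega, fun k hk => ?_⟩
    have h1 := hall _ (getD_mem A 0 (by omega))
    have h2 := hall _ (getD_mem A k hk)
    rw [h1, h2]; exact condP_refl B a
  | [a, b] =>
    rw [hsv] at hpw
    have hab : a < b := by simpa using hpw
    have haA : a ∈ A := (hmem a).mp (by rw [hsv]; simp)
    have hbA : b ∈ A := (hmem b).mp (by rw [hsv]; simp)
    have hall : ∀ x ∈ A, x = a ∨ x = b := by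
      intro x hx
      have := (hmem x).mpr hx
      rw [hsv] at this; simpa using this
    simp only [List.length_cons, List.length_nil, Nat.reduceAdd]
    rw [if_neg (by omega)]
    by_cases hB : B ≤ 0
    · rw [if_pos hB]
      apply solve_zero
      rintro m ⟨hm, hcall⟩
      obtain ⟨ka, hka, hea⟩ := mem_getD A a haA
      obtain ⟨kb, hkb, heb⟩ := mem_getD A b hbA
      have h1 := hcall ka hka
      have h2 := hcall kb hkb
      rw [hea] at h1; rw [heb] at h2
      unfold CondP at h1 h2; omega
    · rw [if_neg hB, if_pos trivial]
      simp only [List.getD_cons_succ, List.getD_cons_zero]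
      by_cases hd : b - a = B
      · rw [if_pos hd]
        apply solve_one
        refine ⟨0, by omega, fun k hk => ?_⟩
        have h1 := hall _ (getD_mem A 0 (by omega))
        have h2 := hall _ (getD_mem A k hk)
        unfold CondP; omega
      · rw [if_neg hd]
        apply solve_zero
        rintro m ⟨hm, hcall⟩
        obtain ⟨ka, hka, hea⟩ := mem_getD A a haA
        obtain ⟨kb, hkb, heb⟩ := mem_getD A b hbA
        have h1 := hcall ka hka
        have h2 := hcall kb hkb
        rw [hea] at h1; rw [heb] at h2
        have h3 := hall _ (getD_mem A m (by omega))
        unfold CondP at h1 h2; omega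
  | [a, b, c] =>
    rw [hsv] at hpw
    have hab : a < b := List.rel_of_pairwise_cons hpw (by simp)
    have hbc : b < c := List.rel_of_pairwise_cons (List.pairwise_cons.mp hpw).2 (by simp)
    have haA : a ∈ A := (hmem a).mp (by rw [hsv]; simp)
    have hbA : b ∈ A := (hmem b).mp (by rw [hsv]; simp)
    have hcA : c ∈ A := (hmem c).mp (by rw [hsv]; simp)
    have hall : ∀ x ∈ A, x = a ∨ x = b ∨ x = c := by
      intro x hx
      have := (hmem x).mpr hx
      rw [hsv] at this; simpa using this
    simp only [List.length_cons, List.length_nil, Nat.reduceAdd]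
    rw [if_neg (by omega)]
    by_cases hB : B ≤ 0
    · rw [if_pos hB]
      apply solve_zero
      rintro m ⟨hm, hcall⟩
      obtain ⟨ka, hka, hea⟩ := mem_getD A a haA
      obtain ⟨kb, hkb, heb⟩ := mem_getD A b hbA
      have h1 := hcall ka hka
      have h2 := hcall kb hkb
      rw [hea] at h1; rw [heb] at h2
      unfold CondP at h1 h2; omega
    · rw [if_neg hB, if_neg (by omega), if_pos trivial]
      simp only [List.getD_cons_succ, List.getD_cons_zero]
      by_cases hd : b - a = B ∧ c - b = B
      · rw [if_pos hd]
        by_cases hpre : ∃ m, m + 1 < A.length ∧ A.getD m 0 = b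
        · obtain ⟨m, hm, he⟩ := hpre
          apply solve_one
          refine ⟨m, hm, fun k hk => ?_⟩
          have h2 := hall _ (getD_mem A k hk)
          rw [he]
          unfold CondP; omega
        · exfalso; apply hD
          right
          push Not at hpre
          have hbLast : A.getLastD 0 = b := by
            obtain ⟨kb, hkb, heb⟩ := mem_getD A b hbA
            have hklb : kb + 1 ≥ A.length := by
              by_contra h
              exact (hpre kb (by omega)) heb
            rw [getLastD_eq_getD A (by omega)]
            have : kb = A.length - 1 := by omega
            rw [← this]; exact heb
          have hxfront : ∀ x ∈ A.dropLast, x = b - B ∨ x = b + B := by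
            intro x hx
            obtain ⟨k, hk, he⟩ := (mem_dropLast_iff A x).mp hx
            have hxb : x ≠ b := fun h => (hpre k hk) (h ▸ he)
            have := hall x (List.mem_of_mem_dropLast hx)
            omega
          have haF : a ∈ A.dropLast := by
            rcases mem_split A a haA with h | h
            · exact h
            · omega
          have hcF : c ∈ A.dropLast := by
            rcases mem_split A c hcA with h | h
            · exact h
            · omega
          rw [hbLast]
          refine ⟨by omega, ?_, ?_, hxfront⟩
          · have : b - B = a := by omega
            rw [this]; exact haF
          · have : b + B = c := by omega
            rw [this]; exact hcF
      · rw [if_neg hd]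
        apply solve_zero
        rintro m ⟨hm, hcall⟩
        obtain ⟨ka, hka, hea⟩ := mem_getD A a haA
        obtain ⟨kb, hkb, heb⟩ := mem_getD A b hbA
        obtain ⟨kc, hkc, hec⟩ := mem_getD A c hcA
        have h1 := hcall ka hka
        have h2 := hcall kb hkb
        have h3 := hcall kc hkc
        rw [hea] at h1; rw [heb] at h2; rw [hec] at h3
        have h4 := hall _ (getD_mem A m (by omega))
        unfold CondP at h1 h2 h3; omega
  | a :: b :: c :: d :: t =>
    rw [hsv] at hpw
    have hm1 : a ∈ A := (hmem a).mp (by rw [hsv]; simp)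
    have hm2 : b ∈ A := (hmem b).mp (by rw [hsv]; simp)
    have hm3 : c ∈ A := (hmem c).mp (by rw [hsv]; simp)
    have hm4 : d ∈ A := (hmem d).mp (by rw [hsv]; simp)
    have h12 : a < b := List.rel_of_pairwise_cons hpw (by simp)
    have h23 : b < c := List.rel_of_pairwise_cons (List.pairwise_cons.mp hpw).2 (by simp)
    have h34 : c < d :=
      List.rel_of_pairwise_cons (List.pairwise_cons.mp (List.pairwise_cons.mp hpw).2).2 (by simp)
    simp only [List.length_cons]
    rw [if_neg (by omega)]
    by_cases hB : B ≤ 0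
    · rw [if_pos hB]
      exact solve_zero A B (no_pivot_of_four A B a b c d hm1 hm2 hm3 hm4 h12 h23 h34)
    · rw [if_neg hB, if_neg (by omega), if_neg (by omega)]
      exact solve_zero A B (no_pivot_of_four A B a b c d hm1 hm2 hm3 hm4 h12 h23 h34)

theorem solve_changed : Claim_changed_solve := by unfold Claim_changed_solve; decide

theorem solve_tight : Claim_exact_solve := by
  intro A B _ hD
  have hmem : ∀ x, x ∈ PySem.List.sorted (PySem.Set.ofList A) (fun x => x) false ↔ x ∈ A := by
    intro x; rw [PySem.List.mem_sorted, PySem.Set.mem_ofList]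
  have hpw := PySem.List.sorted_ofList_pairwise_lt (xs := A)
  have hzero : solve A B = 0 := by
    apply solve_zero
    rintro m ⟨hm, hcall⟩
    rcases hD with h1 | ⟨hB, hmF, hpF, hallF⟩
    · omega
    · have hvm : A.getD m 0 ∈ A.dropLast :=
        (mem_dropLast_iff A _).mpr ⟨m, hm, rfl⟩
      have hv3 := hallF _ hvm
      obtain ⟨km, hkm, hem⟩ := mem_getD A (A.getLastD 0 - B) (List.mem_of_mem_dropLast hmF)
      obtain ⟨kp, hkp, hep⟩ := mem_getD A (A.getLastD 0 + B) (List.mem_of_mem_dropLast hpF)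
      have hc1 := hcall km hkm
      have hc2 := hcall kp hkp
      rw [hem] at hc1; rw [hep] at hc2
      unfold CondP at hc1 hc2
      omega
  have hone : solve_alt A B = 1 := by
    unfold solve_alt
    rcases hD with h1 | ⟨hB, hmF, hpF, hallF⟩
    · -- length ≤ 1 : the distinct-value list has at most one element
      have hle : (PySem.List.sorted (PySem.Set.ofList A) (fun x => x) false).length ≤ 1 := by
        match hsv : PySem.List.sorted (PySem.Set.ofList A) (fun x => x) false with
        | [] => simp
        | [a] => simp
        | a :: b :: t =>
          exfalso
          rw [hsv] at hpw
          have hab : a < b := List.rel_of_pairwise_cons hpw (by simp)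
          have haA : a ∈ A := (hmem a).mp (by rw [hsv]; simp)
          have hbA : b ∈ A := (hmem b).mp (by rw [hsv]; simp)
          match A, h1 with
          | [], _ => simp at haA
          | [x], _ => simp at haA hbA; omega
      rw [if_pos hle]
    · obtain ⟨_, hLA, hmA, hpA, hall, _⟩ := D2_facts A B hB hmF hpF hallF
      obtain ⟨L, hL⟩ : ∃ L, A.getLastD 0 = L := ⟨_, rfl⟩
      rw [hL] at hall hmA hpA hLA
      have hseq : PySem.List.sorted (PySem.Set.ofList A) (fun x => x) false =
          [L - B, L, L + B] := by
        apply PySem.List.sorted_eq_of_perm_of_pairwise_lt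
        · apply (List.perm_ext_iff_of_nodup ?_ (PySem.Set.nodup_ofList A)).mpr
          · intro x
            rw [PySem.Set.mem_ofList]
            simp only [List.mem_cons, List.not_mem_nil, or_false]
            constructor
            · rintro (h | h | h)
              · exact h ▸ hmA
              · exact h ▸ hLA
              · exact h ▸ hpA
            · intro hx
              exact hall x hx
          · refine List.nodup_cons.mpr ⟨?_, List.nodup_cons.mpr ⟨?_, List.nodup_singleton _⟩⟩ <;>
              simp <;> omega
        · refine List.Pairwise.cons (fun y hy => ?_)
            (List.Pairwise.cons (fun y hy => ?_)
              (List.Pairwise.cons (fun y hy => ?_) List.Pairwise.nil))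
          · simp only [List.mem_cons, List.not_mem_nil, or_false] at hy
            rcases hy with h | h <;> omega
          · simp only [List.mem_cons, List.not_mem_nil, or_false] at hy
            omega
          · simp at hy
      rw [hseq]
      simp only [List.length_cons, List.length_nil, Nat.reduceAdd,
        List.getD_cons_succ, List.getD_cons_zero]
      rw [if_neg (by omega), if_neg (by omega), if_neg (by omega), if_pos trivial,
        if_pos (by constructor <;> omega)]
  rw [hzero, hone]; decide
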